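-- pv_equiv track=rewrite | github.com/ishandutta2007/codeforces | ali_pi/normal/982/E.py | solve
-- ===== SOURCE A (Python) =====
-- def mygcd(x, y):
-- 	if x > y:
-- 		d, p, q = mygcd(y, x)
-- 		return d, q, p
-- 	if x == 0:
-- 		return y, 0, 1
-- 	m, r = divmod(y, x)
-- 	d, p, q = mygcd(r, x)
-- 	return d, q - p*m, p
--
-- def solve(n, m, x, y, vx, vy):
-- 	if vx < 0:
-- 		cx, cy = solve(n, m, n - x, y, -vx, vy)
-- 		if cx < 0:
-- 			return cx, cy
-- 		else:
-- 			return n - cx, cy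
-- 	if vy < 0:
-- 		cx, cy = solve(n, m, x, m - y, vx, -vy)
-- 		if cx < 0:
-- 			return cx, cy
-- 		else:
-- 			return cx, m - cy
-- 	if vx == 0:
-- 		if x in (0, n):
-- 			return x, m
-- 		else:
-- 			return -1, -1
-- 	if vy == 0:
-- 		if y in (0, m):
-- 			return n, y
-- 		else:
-- 			return -1, -1
-- 	d, p, q = mygcd(n, m)
-- 	if (x - y) % d != 0:
-- 		return -1, -1
-- 	if x == y and n == m:
-- 		return n, m
-- 	if x == y:
-- 		return ((m // d) % 2) * n, ((n // d) % 2) * m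
-- 	mxy = min(x, y)
-- 	x, y = x - mxy, y - mxy
-- 	n //= d
-- 	m //= d
-- 	x //= d
-- 	y //= d
-- 	c = x - y
-- 	p = (p * c) % m
-- 	q = (-q * c) % n
-- 	if p*n - x < 0:
-- 		p += m * (-((x - p*n) // m))
-- 	if q*m - y < 0:
-- 		q += n * (-((y - q*m) // n))
-- 	return (p % 2) * n * d, (q % 2) * m * d
-- ===== SOURCE B (Python) =====
-- def _extgcd(a, b):
--     # iterative extended Euclid: returns d, p, q with p*a + q*b == d
--     or_, r = a, b
--     op, p = 1, 0
--     oq, q = 0, 1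
--     while r != 0:
--         qt = or_ // r
--         or_, r = r, or_ - qt * r
--         op, p = p, op - qt * p
--         oq, q = q, oq - qt * q
--     return or_, op, oq
--
-- def _coord(b, c, mm, nn, tgt, d):
--     # one pocket coordinate from a Bezout coefficient
--     t = (b * c) % mm
--     if t * nn - tgt < 0:
--         t += mm * (-((tgt - t * nn) // mm))
--     return (t % 2) * nn * d
--
-- def _core(n, m, x, y, vx, vy):
--     # both velocity components already non-negative here
--     if vx == 0:
--         return (x, m) if x in (0, n) else (-1, -1)
--     if vy == 0:
--         return (n, y) if y in (0, m) else (-1, -1)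
--     d, p, q = _extgcd(n, m)
--     if (x - y) % d != 0:
--         return -1, -1
--     if x == y:
--         if n == m:
--             return n, m
--         return ((m // d) % 2) * n, ((n // d) % 2) * m
--     mxy = min(x, y)
--     n1, m1 = n // d, m // d
--     x1, y1 = (x - mxy) // d, (y - mxy) // d
--     c = x1 - y1
--     return _coord(p, c, m1, n1, x1, d), _coord(-q, c, n1, m1, y1, d)
--
-- def solve(n, m, x, y, vx, vy):
--     fx, fy = vx < 0, vy < 0
--     if fx:
--         x, vx = n - x, -vx
--     if fy:
--         y, vy = m - y, -vy
--     cx, cy = _core(n, m, x, y, vx, vy)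
--     if cx < 0:
--         return cx, cy
--     if fx:
--         cx = n - cx
--     if fy:
--         cy = m - cy
--     return cx, cy
-- ===== Notes on version B (the rewrite author's own statement) =====
-- stated objective: alternative
-- what changed: Replaces the recursive extended gcd with an iterative extended-Euclid loop, flattens the vx<0/vy<0 self-recursion into up-front mirror flags applied once at the end, and computes the two pocket coordinates with one shared helper applied symmetrically.
-- outside the precondition, e.g. on solve(0, 2, 1, 1, 1, 1): A returns (0, 0), B returns (0, 0); on solve(0, 2, 1, 0, 1, 1): A returns (-1, -1), B returns (-1, -1)
import Mathlib
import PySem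

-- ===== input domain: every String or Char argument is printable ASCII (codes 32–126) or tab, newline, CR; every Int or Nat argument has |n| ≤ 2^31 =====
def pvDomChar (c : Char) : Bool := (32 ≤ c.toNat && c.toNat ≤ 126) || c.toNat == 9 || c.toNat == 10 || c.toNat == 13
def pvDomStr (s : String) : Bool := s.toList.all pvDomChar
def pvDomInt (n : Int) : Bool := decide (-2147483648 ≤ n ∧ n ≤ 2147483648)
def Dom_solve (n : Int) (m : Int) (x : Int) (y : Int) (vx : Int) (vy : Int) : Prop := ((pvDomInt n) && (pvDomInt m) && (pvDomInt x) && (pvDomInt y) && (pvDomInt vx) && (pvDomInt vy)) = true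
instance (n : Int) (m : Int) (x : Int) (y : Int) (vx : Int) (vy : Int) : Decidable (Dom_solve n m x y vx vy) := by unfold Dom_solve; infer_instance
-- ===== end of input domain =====

-- B replaces A's recursive extended gcd with an iterative extended-Euclid loop and A's
-- sign-normalization self-recursion with up-front mirror flags plus one shared
-- per-coordinate helper (objective: alternative decomposition, same cost).

-- ===== PORT A =====
-- fuel makes A's recursive mygcd total in Lean (on Pre_ inputs the fuel is never exhausted);
-- otherwise a literal transliteration of mygcd.
def mygcdF : Nat → Int → Int → Int × Int × Int
  | 0, _, _ => (0, 0, 0)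
  | f+1, x, y =>
    if x > y then
      let r := mygcdF f y x
      (r.1, r.2.2, r.2.1)
    else if x = 0 then (y, 0, 1)
    else
      let m := PySem.Int.floordiv y x
      let r := PySem.Int.mod y x
      let t := mygcdF f r x
      (t.1, t.2.2 - t.2.1 * m, t.2.1)

def mygcd (x y : Int) : Int × Int × Int := mygcdF (2 * (x.toNat + y.toNat) + 2) x y

-- fuel 3 covers A's bounded self-recursion (vx<0 then vy<0, depth ≤ 2)
def solveF : Nat → Int → Int → Int → Int → Int → Int → Int × Int
  | 0, _, _, _, _, _, _ => (0, 0)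
  | f+1, n, m, x, y, vx, vy =>
    if vx < 0 then
      let r := solveF f n m (n - x) y (-vx) vy
      if r.1 < 0 then r else (n - r.1, r.2)
    else if vy < 0 then
      let r := solveF f n m x (m - y) vx (-vy)
      if r.1 < 0 then r else (r.1, m - r.2)
    else if vx = 0 then
      (if x = 0 ∨ x = n then (x, m) else (-1, -1))
    else if vy = 0 then
      (if y = 0 ∨ y = m then (n, y) else (-1, -1))
    else
      let g := mygcd n m
      let d := g.1
      let p := g.2.1
      let q := g.2.2
      if PySem.Int.mod (x - y) d ≠ 0 then (-1, -1)
      else if x = y ∧ n = m then (n, m)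
      else if x = y then
        (PySem.Int.mod (PySem.Int.floordiv m d) 2 * n, PySem.Int.mod (PySem.Int.floordiv n d) 2 * m)
      else
        let mxy := min x y
        let n1 := PySem.Int.floordiv n d
        let m1 := PySem.Int.floordiv m d
        let x1 := PySem.Int.floordiv (x - mxy) d
        let y1 := PySem.Int.floordiv (y - mxy) d
        let c := x1 - y1
        let p1 := PySem.Int.mod (p * c) m1
        let q1 := PySem.Int.mod (-q * c) n1
        let p2 := if p1 * n1 - x1 < 0 then p1 + m1 * (-(PySem.Int.floordiv (x1 - p1 * n1) m1)) else p1
        let q2 := if q1 * m1 - y1 < 0 then q1 + n1 * (-(PySem.Int.floordiv (y1 - q1 * m1) n1)) else q1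
        (PySem.Int.mod p2 2 * n1 * d, PySem.Int.mod q2 2 * m1 * d)

def solve (n : Int) (m : Int) (x : Int) (y : Int) (vx : Int) (vy : Int) : Int × Int :=
  solveF 3 n m x y vx vy

-- ===== PORT B =====
-- fuel makes Source B's while-loop total in Lean (|r| strictly decreases, so b.natAbs+1 always suffices)
def extLoop : Nat → Int → Int → Int → Int → Int → Int → Int × Int × Int
  | 0, or_, _, op, _, oq, _ => (or_, op, oq)
  | f+1, or_, r, op, p, oq, q =>
    if r = 0 then (or_, op, oq)
    else
      let qt := PySem.Int.floordiv or_ r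
      extLoop f r (or_ - qt * r) p (op - qt * p) q (oq - qt * q)

def extgcd (a b : Int) : Int × Int × Int := extLoop (b.natAbs + 1) a b 1 0 0 1

def coordB (b c mm nn tgt d : Int) : Int :=
  let t := PySem.Int.mod (b * c) mm
  let t2 := if t * nn - tgt < 0 then t + mm * (-(PySem.Int.floordiv (tgt - t * nn) mm)) else t
  PySem.Int.mod t2 2 * nn * d

def coreB (n m x y vx vy : Int) : Int × Int :=
  if vx = 0 then (if x = 0 ∨ x = n then (x, m) else (-1, -1))
  else if vy = 0 then (if y = 0 ∨ y = m then (n, y) else (-1, -1))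
  else
    let g := extgcd n m
    let d := g.1
    let p := g.2.1
    let q := g.2.2
    if PySem.Int.mod (x - y) d ≠ 0 then (-1, -1)
    else if x = y then
      (if n = m then (n, m)
       else (PySem.Int.mod (PySem.Int.floordiv m d) 2 * n, PySem.Int.mod (PySem.Int.floordiv n d) 2 * m))
    else
      let mxy := min x y
      let n1 := PySem.Int.floordiv n d
      let m1 := PySem.Int.floordiv m d
      let x1 := PySem.Int.floordiv (x - mxy) d
      let y1 := PySem.Int.floordiv (y - mxy) d
      let c := x1 - y1
      (coordB p c m1 n1 x1 d, coordB (-q) c n1 m1 y1 d)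

def solve_alt (n : Int) (m : Int) (x : Int) (y : Int) (vx : Int) (vy : Int) : Int × Int :=
  let fx := vx < 0
  let fy := vy < 0
  let x' := if fx then n - x else x
  let vx' := if fx then -vx else vx
  let y' := if fy then m - y else y
  let vy' := if fy then -vy else vy
  let r := coreB n m x' y' vx' vy'
  if r.1 < 0 then r
  else ((if fx then n - r.1 else r.1), (if fy then m - r.2 else r.2))

-- ===== PRECONDITION & SPEC =====
-- Pre_ requires positive table dimensions whenever both velocity components are nonzero:
-- on that gcd branch A's recursive mygcd diverges for a negative dimension and divides by
-- zero for a zero dimension, except on degenerate zero-size-table corners where the value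
-- A returns is accidental (both programs happen to agree there anyway).
def Pre_solve (n : Int) (m : Int) (x : Int) (y : Int) (vx : Int) (vy : Int) : Prop :=
  (vx ≠ 0 ∧ vy ≠ 0) → (1 ≤ n ∧ 1 ≤ m)
instance (n : Int) (m : Int) (x : Int) (y : Int) (vx : Int) (vy : Int) : Decidable (Pre_solve n m x y vx vy) := by unfold Pre_solve; infer_instance

def pvWitness_solve : Int × Int × Int × Int × Int × Int := (4, 6, 1, 3, 1, -1)

def Spec_solve (n : Int) (m : Int) (x : Int) (y : Int) (vx : Int) (vy : Int) (out : Int × Int) : Prop := out = solve_alt n m x y vx vy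
instance (n : Int) (m : Int) (x : Int) (y : Int) (vx : Int) (vy : Int) (out : Int × Int) : Decidable (Spec_solve n m x y vx vy out) := by unfold Spec_solve; infer_instance

-- ===== CLAIM (what is proved, stated in full; the proofs are below) =====
def Claim_equal_solve : Prop := ∀ (n : Int) (m : Int) (x : Int) (y : Int) (vx : Int) (vy : Int), Dom_solve n m x y vx vy → Pre_solve n m x y vx vy → Spec_solve n m x y vx vy (solve n m x y vx vy)


-- ===== LEMMAS AND PROOFS =====

theorem mygcdF_spec : ∀ (f : Nat) (x y : Int), 0 ≤ x → 0 ≤ y →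
    2 * (x.toNat + y.toNat) + (if x > y then 1 else 0) < f →
    (mygcdF f x y).1 = (Int.gcd x y : Int) ∧
    (mygcdF f x y).2.1 * x + (mygcdF f x y).2.2 * y = (Int.gcd x y : Int) := by
  intro f
  induction f with
  | zero => intro x y hx hy hf; omega
  | succ f ih =>
    intro x y hx hy hf
    by_cases hxy : x > y
    · have hyx : ¬ y > x := by omega
      rw [if_pos hxy] at hf
      have hf' : 2 * (y.toNat + x.toNat) + (if y > x then 1 else 0) < f := by
        rw [if_neg hyx]; omega
      obtain ⟨h1, h2⟩ := ih y x hy hx hf'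
      simp only [mygcdF, if_pos hxy]
      rw [Int.gcd_comm x y]
      exact ⟨h1, by linear_combination h2⟩
    · rw [if_neg hxy] at hf
      by_cases hx0 : x = 0
      · subst hx0
        refine ⟨?_, ?_⟩ <;>
          simp [mygcdF, hxy, Int.natAbs_of_nonneg hy]
      · have hxpos : 0 < x := by omega
        have hre : PySem.Int.mod y x = y % x := PySem.Int.mod_eq_emod_of_pos hxpos
        have hr0 : 0 ≤ PySem.Int.mod y x := by rw [hre]; exact Int.emod_nonneg y (by omega)
        have hrx : PySem.Int.mod y x < x := by rw [hre]; exact Int.emod_lt_of_pos y hxpos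
        have hid : PySem.Int.floordiv y x * x + PySem.Int.mod y x = y :=
          PySem.Int.floordiv_mul_add_mod y x
        have hf' : 2 * ((PySem.Int.mod y x).toNat + x.toNat) +
            (if PySem.Int.mod y x > x then 1 else 0) < f := by
          rw [if_neg (by omega)]; omega
        obtain ⟨h1, h2⟩ := ih (PySem.Int.mod y x) x hr0 hx hf'
        have hgcd : Int.gcd (PySem.Int.mod y x) x = Int.gcd x y := by
          rw [hre, Int.emod_def, Int.gcd_comm x y]
          have := Int.gcd_sub_mul_right_left x y (y / x)
          rw [show y - y / x * x = y - x * (y / x) by ring] at this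
          exact this
        simp only [mygcdF, if_neg hxy, if_neg hx0]
        rw [hgcd] at h1 h2
        exact ⟨h1, by linear_combination h2 - (mygcdF f (PySem.Int.mod y x) x).2.1 * hid⟩

theorem extLoop_spec : ∀ (f : Nat) (a b or_ r op p oq q : Int), 1 ≤ or_ → 0 ≤ r → r.natAbs < f →
    op * a + oq * b = or_ → p * a + q * b = r →
    (extLoop f or_ r op p oq q).1 = (Int.gcd or_ r : Int) ∧
    (extLoop f or_ r op p oq q).2.1 * a + (extLoop f or_ r op p oq q).2.2 * b = (Int.gcd or_ r : Int) := by
  intro f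
  induction f with
  | zero => intro a b or_ r op p oq q h1 h2 hf h3 h4; omega
  | succ f ih =>
    intro a b or_ r op p oq q hor hr hf hop hpq
    by_cases hr0 : r = 0
    · subst hr0
      have hna : ((or_.natAbs : Int)) = or_ := Int.natAbs_of_nonneg (by omega)
      refine ⟨?_, ?_⟩ <;> simp [extLoop, hna, hop]
    · have hrpos : 0 < r := by omega
      have hqt : PySem.Int.floordiv or_ r = or_ / r := PySem.Int.floordiv_eq_ediv_of_pos hrpos
      have hr'e : or_ - PySem.Int.floordiv or_ r * r = or_ % r := by
        rw [hqt, Int.emod_def]; ring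
      have hr'0 : 0 ≤ or_ - PySem.Int.floordiv or_ r * r := by
        rw [hr'e]; exact Int.emod_nonneg or_ (by omega)
      have hr'lt : or_ - PySem.Int.floordiv or_ r * r < r := by
        rw [hr'e]; exact Int.emod_lt_of_pos or_ hrpos
      have hgcd : Int.gcd r (or_ - PySem.Int.floordiv or_ r * r) = Int.gcd or_ r := by
        rw [Int.gcd_comm r (or_ - PySem.Int.floordiv or_ r * r)]
        exact Int.gcd_sub_mul_right_left r or_ (PySem.Int.floordiv or_ r)
      obtain ⟨h1, h2⟩ := ih a b r (or_ - PySem.Int.floordiv or_ r * r) p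
        (op - PySem.Int.floordiv or_ r * p) q (oq - PySem.Int.floordiv or_ r * q)
        hrpos hr'0 (by omega) hpq (by linear_combination hop - PySem.Int.floordiv or_ r * hpq)
      simp only [extLoop, if_neg hr0]
      rw [hgcd] at h1 h2
      exact ⟨h1, h2⟩

theorem bezout_mod_congr (n m g c p1 q1 p2 q2 : Int)
    (hn : 1 ≤ n) (hm : 1 ≤ m) (hg : g = (Int.gcd n m : Int))
    (h1 : p1 * n + q1 * m = g) (h2 : p2 * n + q2 * m = g) :
    PySem.Int.mod (p1 * c) (PySem.Int.floordiv m g) = PySem.Int.mod (p2 * c) (PySem.Int.floordiv m g) ∧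
    PySem.Int.mod (-q1 * c) (PySem.Int.floordiv n g) = PySem.Int.mod (-q2 * c) (PySem.Int.floordiv n g) := by
  have hgne : Int.gcd n m ≠ 0 := by
    intro h; rw [Int.gcd_eq_zero_iff] at h; omega
  have hg0 : (0:Int) < g := by
    rw [hg]; exact_mod_cast Nat.pos_of_ne_zero hgne
  have hdn : g ∣ n := hg ▸ Int.gcd_dvd_left n m
  have hdm : g ∣ m := hg ▸ Int.gcd_dvd_right n m
  set N := PySem.Int.floordiv n g with hN
  set M := PySem.Int.floordiv m g with hM
  have hn'e : N = n / g := PySem.Int.floordiv_eq_ediv_of_pos hg0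
  have hm'e : M = m / g := PySem.Int.floordiv_eq_ediv_of_pos hg0
  have hnn : n = N * g := by rw [hn'e, Int.ediv_mul_cancel hdn]
  have hmm : m = M * g := by rw [hm'e, Int.ediv_mul_cancel hdm]
  have hn'pos : 0 < N := by
    by_contra h
    push_neg at h
    nlinarith
  have hm'pos : 0 < M := by
    by_contra h
    push_neg at h
    nlinarith
  have key : (p1 - p2) * N = (q2 - q1) * M := by
    have hz : ((p1 - p2) * N - (q2 - q1) * M) * g = 0 := by
      linear_combination h1 - h2 - (p1 - p2) * hnn - (q1 - q2) * hmm
    rcases mul_eq_zero.mp hz with h | h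
    · linarith
    · exact absurd h (by omega)
  have hcop : IsCoprime M N := by
    rw [Int.isCoprime_iff_gcd_eq_one, hm'e, hn'e, hg, Int.gcd_comm n m]
    exact Int.gcd_div_gcd_div_gcd (Nat.pos_of_ne_zero (by rw [Int.gcd_comm]; exact hgne))
  have hd1 : M ∣ (p1 - p2) :=
    hcop.dvd_of_dvd_mul_right ⟨q2 - q1, by linear_combination key⟩
  have hd2 : N ∣ (q1 - q2) :=
    hcop.symm.dvd_of_dvd_mul_right ⟨p2 - p1, by linear_combination key⟩
  constructor
  · rw [PySem.Int.mod_eq_emod_of_pos hm'pos, PySem.Int.mod_eq_emod_of_pos hm'pos]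
    have hmod : p1 ≡ p2 [ZMOD M] := by
      rw [Int.modEq_iff_dvd]
      obtain ⟨k, hk⟩ := hd1
      exact ⟨-k, by linear_combination - hk⟩
    exact hmod.mul_right c
  · rw [PySem.Int.mod_eq_emod_of_pos hn'pos, PySem.Int.mod_eq_emod_of_pos hn'pos]
    have hmod : -q1 ≡ -q2 [ZMOD N] := by
      rw [Int.modEq_iff_dvd]
      have he : (-q2) - (-q1) = q1 - q2 := by ring
      rw [he]
      exact hd2
    exact hmod.mul_right c

theorem core_eq (n m x y vx vy : Int) (hvx : 0 ≤ vx) (hvy : 0 ≤ vy)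
    (hp : (vx ≠ 0 ∧ vy ≠ 0) → (1 ≤ n ∧ 1 ≤ m)) (f : Nat) :
    solveF (f+1) n m x y vx vy = coreB n m x y vx vy := by
  have h1 : ¬ vx < 0 := by omega
  have h2 : ¬ vy < 0 := by omega
  by_cases hvx0 : vx = 0
  · simp only [solveF, coreB, if_neg h1, if_neg h2, if_pos hvx0]
  by_cases hvy0 : vy = 0
  · simp only [solveF, coreB, if_neg h1, if_neg h2, if_neg hvx0, if_pos hvy0]
  obtain ⟨hn, hm⟩ := hp ⟨hvx0, hvy0⟩
  -- gcd agreement between the two ports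
  have hA := mygcdF_spec (2 * (n.toNat + m.toNat) + 2) n m (by omega) (by omega)
    (by split_ifs <;> omega)
  have hB := extLoop_spec (m.natAbs + 1) n m n m 1 0 0 1 hn (by omega) (by omega)
    (by ring) (by ring)
  have hdA : (mygcd n m).1 = (Int.gcd n m : Int) := hA.1
  have hbzA : (mygcd n m).2.1 * n + (mygcd n m).2.2 * m = (Int.gcd n m : Int) := hA.2
  have hdB : (extgcd n m).1 = (Int.gcd n m : Int) := hB.1
  have hbzB : (extgcd n m).2.1 * n + (extgcd n m).2.2 * m = (Int.gcd n m : Int) := hB.2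
  obtain ⟨hcong1, hcong2⟩ := bezout_mod_congr n m ((Int.gcd n m : Int))
    (PySem.Int.floordiv (x - min x y) ((Int.gcd n m : Int)) -
      PySem.Int.floordiv (y - min x y) ((Int.gcd n m : Int)))
    (mygcd n m).2.1 (mygcd n m).2.2 (extgcd n m).2.1 (extgcd n m).2.2
    hn hm rfl hbzA hbzB
  simp only [solveF, coreB, if_neg h1, if_neg h2, if_neg hvx0, if_neg hvy0]
  rw [hdA, hdB]
  by_cases hdiv : PySem.Int.mod (x - y) ((Int.gcd n m : Int)) ≠ 0
  · rw [if_pos hdiv, if_pos hdiv]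
  · rw [if_neg hdiv, if_neg hdiv]
    by_cases hxy : x = y
    · subst hxy
      by_cases hnm : n = m <;> simp [hnm]
    · rw [if_neg (fun hc => hxy hc.1), if_neg hxy, if_neg hxy]
      simp only [coordB]
      rw [hcong1, hcong2]

-- ===== VERDICT (by name: the statement is the Claim_ definition above) =====
theorem solveF_step_x (f : Nat) (n m x y vx vy : Int) (h : vx < 0) :
    solveF (f+1) n m x y vx vy =
      (if (solveF f n m (n - x) y (-vx) vy).1 < 0 then solveF f n m (n - x) y (-vx) vy
       else (n - (solveF f n m (n - x) y (-vx) vy).1, (solveF f n m (n - x) y (-vx) vy).2)) := by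
  simp only [solveF, if_pos h]

theorem solveF_step_y (f : Nat) (n m x y vx vy : Int) (h1 : ¬ vx < 0) (h2 : vy < 0) :
    solveF (f+1) n m x y vx vy =
      (if (solveF f n m x (m - y) vx (-vy)).1 < 0 then solveF f n m x (m - y) vx (-vy)
       else ((solveF f n m x (m - y) vx (-vy)).1, m - (solveF f n m x (m - y) vx (-vy)).2)) := by
  simp only [solveF, if_neg h1, if_pos h2]

theorem solveF_full (f : Nat) (n m x y vx vy : Int)
    (hpre : (vx ≠ 0 ∧ vy ≠ 0) → (1 ≤ n ∧ 1 ≤ m)) :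
    solveF (f+1+1+1) n m x y vx vy = solve_alt n m x y vx vy := by
  by_cases hfx : vx < 0
  · by_cases hfy : vy < 0
    · rw [solveF_step_x (f+1+1) n m x y vx vy hfx,
        solveF_step_y (f+1) n m (n - x) y (-vx) vy (by omega) hfy,
        core_eq n m (n - x) (m - y) (-vx) (-vy) (by omega) (by omega)
          (fun _ => hpre ⟨by omega, by omega⟩) f]
      simp only [solve_alt, if_pos hfx, if_pos hfy]
      rcases hC : coreB n m (n - x) (m - y) (-vx) (-vy) with ⟨cx, cy⟩
      by_cases hcx : cx < 0 <;> simp [hcx]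
    · rw [solveF_step_x (f+1+1) n m x y vx vy hfx,
        core_eq n m (n - x) y (-vx) vy (by omega) (by omega)
          (fun h => hpre ⟨by omega, h.2⟩) (f+1)]
      simp only [solve_alt, if_pos hfx, if_neg hfy]
  · by_cases hfy : vy < 0
    · rw [solveF_step_y (f+1+1) n m x y vx vy hfx hfy,
        core_eq n m x (m - y) vx (-vy) (by omega) (by omega)
          (fun h => hpre ⟨h.1, by omega⟩) (f+1)]
      simp only [solve_alt, if_neg hfx, if_pos hfy]
    · rw [core_eq n m x y vx vy (by omega) (by omega) hpre (f+1+1)]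
      simp only [solve_alt, if_neg hfx, if_neg hfy]
      rcases hC : coreB n m x y vx vy with ⟨cx, cy⟩
      by_cases hcx : cx < 0 <;> simp [hcx]

theorem solve_spec : Claim_equal_solve := by
  intro n m x y vx vy hdom hpre
  unfold Spec_solve solve
  rw [show (3:Nat) = 0+1+1+1 from rfl]
  exact solveF_full 0 n m x y vx vy hpre
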